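-- pv_equiv track=rewrite | github.com/Mourya-s/Python_assignment_dgb | unit_testing/test_Piling_Up!.py | can_stack
-- ===== SOURCE A (Python) =====
-- def can_stack(cubes):
--     cubes = cubes[:]  # avoid modifying original list
--     last = float('inf')
--
--     while cubes:
--         if cubes[0] >= cubes[-1]:
--             pick = cubes.pop(0)
--         else:
--             pick = cubes.pop()
--
--         if pick > last:
--             return "No"
--
--         last = pick
--
--     return "Yes"
-- ===== SOURCE B (Python) =====
-- def can_stack(cubes):
--     # valley test: non-increasing prefix then non-decreasing suffix; single pass, no copy
--     i = 0
--     n = len(cubes)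
--     while i < n - 1 and cubes[i] >= cubes[i + 1]:
--         i += 1
--     while i < n - 1 and cubes[i] <= cubes[i + 1]:
--         i += 1
--     return "Yes" if i >= n - 1 else "No"
-- ===== Notes on version B (the rewrite author's own statement) =====
-- stated objective: simpler
-- what changed: B replaces A's destructive greedy simulation (copying the list and repeatedly popping the larger end while tracking the last pick) with a single index scan that checks the list is valley-shaped: a non-increasing prefix followed by a non-decreasing suffix.
import Mathlib
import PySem

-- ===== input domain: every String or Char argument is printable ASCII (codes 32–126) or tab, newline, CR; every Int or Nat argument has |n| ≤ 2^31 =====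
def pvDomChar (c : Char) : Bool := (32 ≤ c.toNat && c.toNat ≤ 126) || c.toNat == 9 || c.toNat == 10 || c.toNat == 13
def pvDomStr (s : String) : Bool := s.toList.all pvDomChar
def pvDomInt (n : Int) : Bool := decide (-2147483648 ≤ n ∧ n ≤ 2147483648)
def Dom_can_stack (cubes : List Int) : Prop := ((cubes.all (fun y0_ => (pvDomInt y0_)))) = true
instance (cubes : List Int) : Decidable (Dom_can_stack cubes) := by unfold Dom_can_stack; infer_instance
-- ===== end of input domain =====

-- B replaces A's destructive pop-the-larger-end greedy with a single non-destructive valley-shape scan; the theorems below prove the return values agree on every input (neither port mutates).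

-- ===== PORT A =====
-- cubes[-1] on a nonempty list (used by both the port and the lemmas)
def gl (l : List Int) : Int := l.getLastD 0

-- A's while loop over the shrinking copy; `last = float('inf')` is modelled as `none`
-- (`pick > inf` is always false, and `last` is `some _` from the first iteration on).
-- `cubes[0] >= cubes[-1]` pops the front (pop(0)), otherwise the back (pop()).
def canStackLoop : List Int → Option Int → String
  | [], _ => "Yes"
  | x :: xs, last =>
    if gl (x :: xs) ≤ x then
      -- pick = cubes.pop(0)
      if (match last with | none => false | some l => decide (l < x)) then "No"
      else canStackLoop xs (some x)
    else
      -- pick = cubes.pop()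
      if (match last with | none => false | some l => decide (l < gl (x :: xs))) then "No"
      else canStackLoop ((x :: xs).dropLast) (some (gl (x :: xs)))
termination_by c _ => c.length
decreasing_by
  · simp
  · simp [List.length_dropLast]

def can_stack (cubes : List Int) : String := canStackLoop cubes none

-- ===== PORT B =====
-- B's first while loop: advance past the non-increasing prefix (cubes[i] >= cubes[i+1]).
def dropDec : List Int → List Int
  | a :: b :: rest => if b ≤ a then dropDec (b :: rest) else a :: b :: rest
  | l => l

-- B's second while loop: the remainder must be non-decreasing (i must reach n-1).
def isInc : List Int → Bool
  | a :: b :: rest => decide (a ≤ b) && isInc (b :: rest)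
  | _ => true

def can_stack_alt (cubes : List Int) : String :=
  if isInc (dropDec cubes) then "Yes" else "No"

-- ===== PRECONDITION & SPEC =====
def Spec_can_stack (cubes : List Int) (out : String) : Prop := out = can_stack_alt cubes
instance (cubes : List Int) (out : String) : Decidable (Spec_can_stack cubes out) := by unfold Spec_can_stack; infer_instance

-- ===== CLAIM (what is proved, stated in full; the proofs are below) =====
def Claim_equal_can_stack : Prop := ∀ (cubes : List Int), Dom_can_stack cubes → Spec_can_stack cubes (can_stack cubes)

-- ===== LEMMAS AND PROOFS =====

theorem gl_single (a : Int) : gl [a] = a := rfl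

theorem gl_cons_cons (x b : Int) (t : List Int) : gl (x :: b :: t) = gl (b :: t) := by
  simp [gl]

theorem dropLast_concat_gl (l : List Int) (h : l ≠ []) : l.dropLast ++ [gl l] = l := by
  induction l with
  | nil => exact absurd rfl h
  | cons a t ih =>
    cases t with
    | nil => simp [gl]
    | cons b t2 =>
      rw [List.dropLast_cons₂, gl_cons_cons, List.cons_append, ih (by simp)]

-- "ok c l": the loop from state (c, some l) succeeds — c is a valley and its larger end is ≤ l
def ok : List Int → Int → Bool
  | [], _ => true
  | x :: xs, l => isInc (dropDec (x :: xs)) && decide (max x (gl (x :: xs)) ≤ l)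

theorem ok_cons (x : Int) (xs : List Int) (l : Int) :
    ok (x :: xs) l = (isInc (dropDec (x :: xs)) && decide (max x (gl (x :: xs)) ≤ l)) := rfl

theorem isInc_head_le_gl (t : List Int) (b : Int) (h : isInc (b :: t) = true) : b ≤ gl (b :: t) := by
  induction t generalizing b with
  | nil => simp [gl]
  | cons c t ih =>
    simp only [isInc, Bool.and_eq_true, decide_eq_true_eq] at h
    have := ih c h.2
    rw [gl_cons_cons]
    omega

theorem isInc_tail (a : Int) (l : List Int) (h : isInc (a :: l) = true) : isInc l = true := by
  cases l with
  | nil => rfl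
  | cons b t => simp only [isInc, Bool.and_eq_true] at h; exact h.2

theorem isInc_append_pair (t : List Int) (w e : Int) (h : isInc (t ++ [w, e]) = true) : w ≤ e := by
  induction t with
  | nil =>
    simp only [List.nil_append, isInc, Bool.and_eq_true, decide_eq_true_eq] at h
    exact h.1
  | cons a t ih => exact ih (isInc_tail a _ (by simpa using h))

theorem isInc_append (t : List Int) (b e : Int) (h : gl (b :: t) ≤ e) :
    isInc ((b :: t) ++ [e]) = isInc (b :: t) := by
  induction t generalizing b with
  | nil =>
    rw [gl_single] at h
    simp [isInc, h]
  | cons c t ih =>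
    rw [gl_cons_cons] at h
    have hrec := ih c h
    simp only [List.cons_append] at hrec ⊢
    simp only [isInc, hrec]

theorem dropDec_append (ys : List Int) (e : Int) (hne : ys ≠ []) (h : gl ys ≤ e) :
    isInc (dropDec (ys ++ [e])) = isInc (dropDec ys) := by
  induction ys with
  | nil => exact absurd rfl hne
  | cons a t ih =>
    cases t with
    | nil =>
      rw [gl_single] at h
      by_cases hc : e ≤ a
      · have hae : a = e := le_antisymm h hc
        simp [dropDec, isInc, hae]
      · simp only [List.cons_append, List.nil_append, dropDec, if_neg hc]
        simp [isInc]
        omega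
    | cons b t =>
      rw [gl_cons_cons] at h
      by_cases hc : b ≤ a
      · simp only [List.cons_append, dropDec, if_pos hc]
        exact ih (by simp) h
      · simp only [List.cons_append, dropDec, if_neg hc]
        have h2 := isInc_append t b e h
        simp only [List.cons_append] at h2
        simp only [isInc, h2]

theorem dropDec_append_bad (ys : List Int) (e : Int) (hne : ys ≠ [])
    (hh : ys.headD 0 ≤ e) (hl : e < gl ys) : isInc (dropDec (ys ++ [e])) = false := by
  induction ys with
  | nil => exact absurd rfl hne
  | cons a t ih =>
    cases t with
    | nil => rw [gl_single] at hl; simp at hh; omega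
    | cons b t =>
      rw [gl_cons_cons] at hl
      by_cases hc : b ≤ a
      · simp only [List.cons_append, dropDec, if_pos hc]
        have hb : (b :: t).headD 0 ≤ e := by
          simp only [List.headD_cons] at hh ⊢; omega
        exact ih (by simp) hb hl
      · simp only [List.cons_append, dropDec, if_neg hc]
        -- the appended list ends with the strictly decreasing pair (gl (b::t), e)
        by_contra hfalse
        have hinc : isInc (a :: b :: (t ++ [e])) = true := Bool.of_not_eq_false hfalse
        have htl : isInc ((b :: t) ++ [e]) = true := isInc_tail a _ (by simpa using hinc)
        have hsplit : (b :: t) ++ [e] = (b :: t).dropLast ++ [gl (b :: t), e] := by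
          conv_lhs => rw [← dropLast_concat_gl (b :: t) (by simp)]
          simp
        rw [hsplit] at htl
        have := isInc_append_pair _ _ _ htl
        omega

-- crux, front-pick case: valley (x::xs) = ok xs x  when gl (x::xs) ≤ x
theorem crux1 (x : Int) (xs : List Int) (h : gl (x :: xs) ≤ x) :
    isInc (dropDec (x :: xs)) = ok xs x := by
  cases xs with
  | nil => simp [dropDec, isInc, ok]
  | cons b t =>
    rw [gl_cons_cons] at h
    by_cases hc : b ≤ x
    · have hmax : max b (gl (b :: t)) ≤ x := by omega
      simp [dropDec, hc, ok, hmax]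
    · simp only [dropDec, if_neg hc, ok]
      have hmax : decide (max b (gl (b :: t)) ≤ x) = false := by
        simp only [decide_eq_false_iff_not, max_le_iff]; omega
      rw [hmax, Bool.and_false]
      simp only [isInc]
      have hxb : decide (x ≤ b) = true := by simp; omega
      rw [hxb, Bool.true_and]
      by_contra hfalse
      have h1 : isInc (b :: t) = true := Bool.of_not_eq_false (by simpa using hfalse)
      have := isInc_head_le_gl t b h1
      omega

-- crux, back-pick case: valley (x::xs) = ok (dropLast (x::xs)) (gl (x::xs)) when x < gl (x::xs)
theorem crux2 (x : Int) (xs : List Int) (h : x < gl (x :: xs)) :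
    isInc (dropDec (x :: xs)) = ok ((x :: xs).dropLast) (gl (x :: xs)) := by
  cases xs with
  | nil => rw [gl_single] at h; omega
  | cons b t =>
    rw [List.dropLast_cons₂]
    set e := gl (x :: b :: t) with he
    have hsplit : x :: b :: t = (x :: (b :: t).dropLast) ++ [e] := by
      conv_lhs => rw [← dropLast_concat_gl (x :: b :: t) (by simp)]
      rw [List.dropLast_cons₂]
    by_cases hc : gl (x :: (b :: t).dropLast) ≤ e
    · rw [hsplit, dropDec_append _ e (by simp) hc]
      have hmax : decide (max x (gl (x :: (b :: t).dropLast)) ≤ e) = true :=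
        decide_eq_true (max_le (le_of_lt h) hc)
      simp only [ok_cons, hmax, Bool.and_true]
    · rw [hsplit, dropDec_append_bad _ e (by simp) (by simpa using le_of_lt h) (by omega)]
      have hmax : decide (max x (gl (x :: (b :: t).dropLast)) ≤ e) = false := by
        simp only [decide_eq_false_iff_not, max_le_iff]; omega
      simp only [ok_cons, hmax, Bool.and_false]

theorem main_loop (n : Nat) : ∀ (c : List Int) (l : Int), c.length ≤ n →
    canStackLoop c (some l) = if ok c l then "Yes" else "No" := by
  induction n with
  | zero =>
    intro c l hc
    have hnil : c = [] := List.length_eq_zero_iff.mp (Nat.le_zero.mp hc)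
    subst hnil
    simp [canStackLoop, ok]
  | succ n ih =>
    intro c l hc
    cases c with
    | nil => simp [canStackLoop, ok]
    | cons x xs =>
      rw [canStackLoop]
      by_cases h : gl (x :: xs) ≤ x
      · rw [if_pos h]
        have hmax : max x (gl (x :: xs)) = x := by omega
        rw [ih xs x (by simp at hc; omega)]
        rw [ok_cons, crux1 x xs h, hmax]
        by_cases hlx : l < x
        · have hxl : ¬ x ≤ l := by omega
          simp [hlx, hxl]
        · have hxl : x ≤ l := by omega
          simp [hlx, hxl]
      · rw [if_neg h]
        have hgl : x < gl (x :: xs) := by omega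
        have hmax : max x (gl (x :: xs)) = gl (x :: xs) := by omega
        have hlen : ((x :: xs).dropLast).length ≤ n := by
          simp only [List.length_dropLast, List.length_cons] at *; omega
        rw [ih _ _ hlen]
        rw [ok_cons, crux2 x xs hgl, hmax]
        by_cases hlx : l < gl (x :: xs)
        · have hxl : ¬ gl (x :: xs) ≤ l := by omega
          simp [hlx, hxl]
        · have hxl : gl (x :: xs) ≤ l := by omega
          simp [hlx, hxl]

-- ===== VERDICT (by name: the statement is the Claim_ definition above) =====
theorem can_stack_spec : Claim_equal_can_stack := by
  unfold Claim_equal_can_stack Spec_can_stack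
  intro cubes _
  unfold can_stack can_stack_alt
  cases cubes with
  | nil => simp [canStackLoop, dropDec, isInc]
  | cons x xs =>
    rw [canStackLoop]
    by_cases h : gl (x :: xs) ≤ x
    · rw [if_pos h, if_neg (by simp)]
      rw [main_loop xs.length xs x le_rfl, crux1 x xs h]
    · rw [if_neg h, if_neg (by simp)]
      have hgl : x < gl (x :: xs) := by omega
      rw [main_loop (x :: xs).dropLast.length ((x :: xs).dropLast) (gl (x :: xs)) le_rfl,
        crux2 x xs hgl]
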